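-- pv_equiv track=rewrite | github.com/royvanrijn/parameter-golf | train_experiment2.py | scan_coords
-- ===== SOURCE A (Python) =====
-- def scan_coords(rows: int, cols: int, scan: str) -> list[tuple[int, int, int]]:
--     """Returns (r, c, direction) where direction is +1 or -1 along row traversal."""
--     out: list[tuple[int, int, int]] = []
--     if scan == "row_major":
--         for r in range(rows):
--             for c in range(cols):
--                 out.append((r, c, 1))
--         return out
--     if scan == "serpentine":
--         for r in range(rows):
--             if r % 2 == 0:
--                 for c in range(cols):
--                     out.append((r, c, 1))
--             else:
--                 for c in range(cols - 1, -1, -1):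
--                     out.append((r, c, -1))
--         return out
--     raise ValueError(f"unknown scan: {scan}")
-- ===== SOURCE B (Python) =====
-- def scan_coords(rows: int, cols: int, scan: str) -> list[tuple[int, int, int]]:
--     """Returns (r, c, direction) where direction is +1 or -1 along row traversal."""
--     if scan not in ("row_major", "serpentine"):
--         raise ValueError(f"unknown scan: {scan}")
--     out = [(r, c, 1) for r in range(rows) for c in range(cols)]
--     if scan == "serpentine":
--         for r in range(1, rows, 2):
--             out[r * cols:(r + 1) * cols] = [(r, c, -1) for c in range(cols - 1, -1, -1)]
--     return out
-- ===== Notes on version B (the rewrite author's own statement) =====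
-- stated objective: alternative
-- what changed: B validates the scan name up front, builds the whole grid as a single row-major comprehension, and then converts to serpentine order by slice-overwriting each odd row in a second pass, instead of A's per-row branch inside one append-accumulator loop.
import Mathlib
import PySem

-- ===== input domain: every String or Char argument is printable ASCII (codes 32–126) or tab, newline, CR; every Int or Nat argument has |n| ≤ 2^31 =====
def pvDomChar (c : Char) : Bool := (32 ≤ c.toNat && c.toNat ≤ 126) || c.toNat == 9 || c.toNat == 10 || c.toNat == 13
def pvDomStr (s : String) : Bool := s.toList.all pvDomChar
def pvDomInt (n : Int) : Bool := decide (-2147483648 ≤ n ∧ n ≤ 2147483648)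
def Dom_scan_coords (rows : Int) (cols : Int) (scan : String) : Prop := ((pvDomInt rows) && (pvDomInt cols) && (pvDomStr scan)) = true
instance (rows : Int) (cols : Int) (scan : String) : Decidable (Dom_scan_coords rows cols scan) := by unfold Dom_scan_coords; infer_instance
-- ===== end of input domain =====

-- B rebuilds the scan in two passes: a single row-major comprehension, then slice-overwrites of the
-- odd rows for the serpentine order (validation first); same return value, different decomposition.

-- ===== PORT A =====
-- literal transliteration of Source A: append-accumulator loops, branch per row
def scan_coords (rows : Int) (cols : Int) (scan : String) : List (Int × Int × Int) :=
  if scan = "row_major" then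
    (PySem.List.pyRange 0 rows).foldl (fun out r =>
      (PySem.List.pyRange 0 cols).foldl (fun out c => out ++ [(r, c, 1)]) out) []
  else if scan = "serpentine" then
    (PySem.List.pyRange 0 rows).foldl (fun out r =>
      if PySem.Int.mod r 2 = 0 then
        (PySem.List.pyRange 0 cols).foldl (fun out c => out ++ [(r, c, 1)]) out
      else
        (PySem.List.pyRange (cols - 1) (-1) (-1)).foldl (fun out c => out ++ [(r, c, -1)]) out) []
  else []  -- raise ValueError: these inputs are excluded by Pre_scan_coords

-- ===== PORT B =====
-- Python slice assignment `xs[a:b] = ys` (step 1), ported by hand (PySem has no slice-assign):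
-- exact on all ints: negative indices are shifted by len(xs), then clamped to [0, len(xs)],
-- and the deleted region is empty when the stop index falls before the start.
def pySetSlice (xs : List (Int × Int × Int)) (a b : Int) (ys : List (Int × Int × Int)) :
    List (Int × Int × Int) :=
  let n : Int := xs.length
  let a' : Nat := (min (max (if a < 0 then a + n else a) 0) n).toNat
  let b' : Nat := max a' ((min (max (if b < 0 then b + n else b) 0) n).toNat)
  xs.take a' ++ ys ++ xs.drop b'

-- literal transliteration of Source B: validate, one row-major comprehension, slice-overwrite odd rows
def scan_coords_alt (rows : Int) (cols : Int) (scan : String) : List (Int × Int × Int) :=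
  if ¬(scan = "row_major" ∨ scan = "serpentine") then []  -- raise ValueError: excluded by Pre_
  else
    let out := (PySem.List.pyRange 0 rows).flatMap (fun r =>
      (PySem.List.pyRange 0 cols).map (fun c => (r, c, 1)))
    if scan = "serpentine" then
      (PySem.List.pyRange 1 rows 2).foldl
        (fun out r => pySetSlice out (r * cols) ((r + 1) * cols)
          ((PySem.List.pyRange (cols - 1) (-1) (-1)).map (fun c => (r, c, -1)))) out
    else out

-- ===== PRECONDITION & SPEC =====
-- Pre_ excludes exactly the scan strings on which the Python A raises ValueError.
def Pre_scan_coords (_rows : Int) (_cols : Int) (scan : String) : Prop :=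
  scan = "row_major" ∨ scan = "serpentine"
instance (rows : Int) (cols : Int) (scan : String) : Decidable (Pre_scan_coords rows cols scan) := by
  unfold Pre_scan_coords; infer_instance

def pvWitness_scan_coords : Int × Int × String := (3, 2, "serpentine")

def Spec_scan_coords (rows : Int) (cols : Int) (scan : String) (out : List (Int × Int × Int)) : Prop := out = scan_coords_alt rows cols scan
instance (rows : Int) (cols : Int) (scan : String) (out : List (Int × Int × Int)) : Decidable (Spec_scan_coords rows cols scan out) := by unfold Spec_scan_coords; infer_instance

-- ===== CLAIM (what is proved, stated in full; the proofs are below) =====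
def Claim_equal_scan_coords : Prop := ∀ (rows : Int) (cols : Int) (scan : String), Dom_scan_coords rows cols scan → Pre_scan_coords rows cols scan → Spec_scan_coords rows cols scan (scan_coords rows cols scan)

-- ===== LEMMAS AND PROOFS =====

-- A's per-row branch, with the inner append-loops summarised as maps
def pvRowA (cols r : Int) : List (Int × Int × Int) :=
  if PySem.Int.mod r 2 = 0 then (PySem.List.pyRange 0 cols).map (fun c => (r, c, 1))
  else (PySem.List.pyRange (cols - 1) (-1) (-1)).map (fun c => (r, c, -1))

def pvFwd (cols r : Int) : List (Int × Int × Int) :=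
  (PySem.List.pyRange 0 cols).map (fun c => (r, c, 1))

def pvBwd (cols r : Int) : List (Int × Int × Int) :=
  (PySem.List.pyRange (cols - 1) (-1) (-1)).map (fun c => (r, c, -1))

theorem pv_len_fwd (cols r : Int) : (pvFwd cols r).length = cols.toNat := by
  simp [pvFwd, PySem.List.length_pyRange_one]

theorem pv_len_bwd (cols r : Int) : (pvBwd cols r).length = cols.toNat := by
  simp [pvBwd, PySem.List.length_pyRange_neg_one]

theorem pv_flatMap_congr {α β : Type} (l : List α) (f g : α → List β)
    (h : ∀ x ∈ l, f x = g x) : l.flatMap f = l.flatMap g := by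
  simp only [List.flatMap_def]
  rw [List.map_congr_left h]

theorem pv_flatMap_len {β : Type} (L : Nat) (g : Int → List β)
    (hg : ∀ x, (g x).length = L) (l : List Int) :
    (l.flatMap g).length = l.length * L := by
  induction l with
  | nil => simp
  | cons x xs ih => simp [List.flatMap_cons, ih, hg, Nat.succ_mul, Nat.add_comm]

theorem pv_setSlice_exact (xs ys : List (Int × Int × Int)) (a b : Int)
    (h0 : 0 ≤ a) (hab : a ≤ b) (hb : b ≤ (xs.length : Int)) :
    pySetSlice xs a b ys = xs.take a.toNat ++ ys ++ xs.drop b.toNat := by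
  unfold pySetSlice
  have h1 : ¬ a < 0 := by omega
  have h2 : ¬ b < 0 := by omega
  simp only [h1, h2, if_false]
  have e1 : (min (max a 0) (xs.length : Int)).toNat = a.toNat := by
    simp [min_def, max_def]; omega
  have e2 : (min (max b 0) (xs.length : Int)).toNat = b.toNat := by
    simp [min_def, max_def]; omega
  rw [e1, e2]
  have : max a.toNat b.toNat = b.toNat := by omega
  rw [this]

-- A's serpentine loop (inner folds as appends of row lists) is flatMap of pvRowA
theorem pv_foldl_if_append (p : Int → Prop) [DecidablePred p] (F B : Int → List (Int × Int × Int))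
    (l : List Int) (acc : List (Int × Int × Int)) :
    l.foldl (fun out r => if p r then out ++ F r else out ++ B r) acc
      = acc ++ l.flatMap (fun r => if p r then F r else B r) := by
  induction l generalizing acc with
  | nil => simp
  | cons x xs ih =>
    simp only [List.foldl_cons, List.flatMap_cons, ih]
    by_cases h : p x <;> simp [h]

theorem pv_flatMap_split (rows r : Int) (h0 : 0 ≤ r) (hr : r < rows)
    (g : Int → List (Int × Int × Int)) :
    (PySem.List.pyRange 0 rows).flatMap g
      = (PySem.List.pyRange 0 r).flatMap g ++ g r ++ (PySem.List.pyRange (r + 1) rows).flatMap g := by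
  rw [PySem.List.pyRange_one_append 0 r rows h0 (by omega), PySem.List.pyRange_one_cons hr]
  simp [List.flatMap_append, List.flatMap_cons, List.append_assoc]

-- one slice-overwrite replaces exactly row r of a flatMap of equal-length rows
theorem pv_step_replace (rows cols : Int) (g : Int → List (Int × Int × Int))
    (hg : ∀ x, (g x).length = cols.toNat) (ys : List (Int × Int × Int))
    (hys : ys.length = cols.toNat) (r : Int) (h0 : 0 ≤ r) (hr : r < rows) :
    pySetSlice ((PySem.List.pyRange 0 rows).flatMap g) (r * cols) ((r + 1) * cols) ys
      = (PySem.List.pyRange 0 r).flatMap g ++ ys ++ (PySem.List.pyRange (r + 1) rows).flatMap g := by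
  by_cases hc : cols ≤ 0
  · have hL : cols.toNat = 0 := by omega
    have hfm : ∀ l : List Int, l.flatMap g = [] := fun l =>
      List.eq_nil_of_length_eq_zero (by rw [pv_flatMap_len cols.toNat g hg l, hL, Nat.mul_zero])
    have hys0 : ys = [] := List.eq_nil_of_length_eq_zero (by rw [hys, hL])
    simp [hfm, hys0, pySetSlice]
  · rw [not_le] at hc
    obtain ⟨m, rfl⟩ : ∃ m : Nat, r = (m : Int) := ⟨r.toNat, (Int.toNat_of_nonneg h0).symm⟩
    obtain ⟨L, rfl⟩ : ∃ L : Nat, cols = (L : Int) := ⟨cols.toNat, (Int.toNat_of_nonneg (le_of_lt hc)).symm⟩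
    have hgL : ∀ x, (g x).length = L := by intro x; rw [hg x]; simp
    have hysL : ys.length = L := by rw [hys]; simp
    rw [pv_flatMap_split rows m h0 hr g]
    have hPlen : ((PySem.List.pyRange 0 (m : Int)).flatMap g).length = m * L := by
      rw [pv_flatMap_len L g hgL, PySem.List.length_pyRange_one]; simp
    have ea : ((m : Int) * L) = ((m * L : Nat) : Int) := by push_cast; ring
    have eb : (((m : Int) + 1) * L) = ((m * L + L : Nat) : Int) := by push_cast; ring
    rw [pv_setSlice_exact _ _ _ _ (by positivity) (by nlinarith) ?_, ea, eb,
        Int.toNat_natCast, Int.toNat_natCast]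
    · have t : List.take (m * L) ((PySem.List.pyRange 0 (m : Int)).flatMap g ++ g m
            ++ (PySem.List.pyRange ((m : Int) + 1) rows).flatMap g)
          = (PySem.List.pyRange 0 (m : Int)).flatMap g := by
        rw [List.append_assoc]; exact List.take_left' hPlen
      have d : List.drop (m * L + L) ((PySem.List.pyRange 0 (m : Int)).flatMap g ++ g m
            ++ (PySem.List.pyRange ((m : Int) + 1) rows).flatMap g)
          = (PySem.List.pyRange ((m : Int) + 1) rows).flatMap g :=
        List.drop_left' (by simp [hPlen, hgL])
      rw [t, d, List.append_assoc]
    · simp only [List.length_append, hPlen, hgL,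
        pv_flatMap_len L g hgL, PySem.List.length_pyRange_one]
      push_cast
      have : ((rows - ((m : Int) + 1)).toNat : Int) = rows - m - 1 := by omega
      rw [this]; nlinarith

theorem pv_fold_slices (rows cols : Int) :
    ∀ (os : List Int), (∀ r ∈ os, 1 ≤ r ∧ r < rows) →
    ∀ (g : Int → List (Int × Int × Int)), (∀ x, (g x).length = cols.toNat) →
    os.foldl (fun acc r => pySetSlice acc (r * cols) ((r + 1) * cols) (pvBwd cols r))
        ((PySem.List.pyRange 0 rows).flatMap g)
      = (PySem.List.pyRange 0 rows).flatMap
          (os.foldl (fun g r => Function.update g r (pvBwd cols r)) g) := by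
  intro os
  induction os with
  | nil => intro _ g _; rfl
  | cons r rs ih =>
    intro hos g hg
    have hr := hos r (List.mem_cons_self)
    simp only [List.foldl_cons]
    have hstep := pv_step_replace rows cols g hg (pvBwd cols r) (pv_len_bwd cols r) r
      (by omega) hr.2
    have hsplit := pv_flatMap_split rows r (by omega) hr.2 (Function.update g r (pvBwd cols r))
    have hside1 : (PySem.List.pyRange 0 r).flatMap (Function.update g r (pvBwd cols r))
        = (PySem.List.pyRange 0 r).flatMap g := by
      refine pv_flatMap_congr _ _ _ (fun x hx => ?_)
      have := PySem.List.mem_pyRange_one.mp hx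
      exact Function.update_of_ne (by omega) _ _
    have hside2 : (PySem.List.pyRange (r + 1) rows).flatMap (Function.update g r (pvBwd cols r))
        = (PySem.List.pyRange (r + 1) rows).flatMap g := by
      refine pv_flatMap_congr _ _ _ (fun x hx => ?_)
      have := PySem.List.mem_pyRange_one.mp hx
      exact Function.update_of_ne (by omega) _ _
    rw [hstep, show (PySem.List.pyRange 0 r).flatMap g ++ pvBwd cols r
          ++ (PySem.List.pyRange (r + 1) rows).flatMap g
        = (PySem.List.pyRange 0 rows).flatMap (Function.update g r (pvBwd cols r)) by
      rw [hsplit, hside1, hside2, Function.update_self]]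
    exact ih (fun x hx => hos x (List.mem_cons_of_mem r hx)) _
      (fun x => by
        by_cases hxr : x = r
        · subst hxr; rw [Function.update_self]; exact pv_len_bwd cols x
        · rw [Function.update_of_ne hxr]; exact hg x)

theorem pv_update_fold_eval (cols : Int) (os : List Int) (g : Int → List (Int × Int × Int))
    (x : Int) :
    (os.foldl (fun g r => Function.update g r (pvBwd cols r)) g) x
      = if x ∈ os then pvBwd cols x else g x := by
  induction os generalizing g with
  | nil => simp
  | cons r rs ih =>
    simp only [List.foldl_cons, ih, List.mem_cons]
    by_cases hx : x ∈ rs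
    · simp [hx]
    · by_cases hxr : x = r
      · subst hxr; simp [hx, Function.update_self]
      · simp [hx, hxr]

-- ===== VERDICT (by name: the statement is the Claim_ definition above) =====
theorem scan_coords_spec : Claim_equal_scan_coords := by
  intro rows cols scan _ hpre
  unfold Spec_scan_coords
  rcases hpre with h | h <;> subst h
  · -- row_major
    unfold scan_coords scan_coords_alt
    simp only [PySem.List.foldl_append_singleton_eq_map, PySem.List.foldl_append_eq_flatMap,
      List.nil_append]
    simp
  · -- serpentine
    have hA : scan_coords rows cols "serpentine"
        = (PySem.List.pyRange 0 rows).flatMap (pvRowA cols) := by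
      unfold scan_coords
      rw [if_neg (show ¬("serpentine" : String) = "row_major" by decide), if_pos rfl]
      simp only [PySem.List.foldl_append_singleton_eq_map]
      rw [pv_foldl_if_append (fun r => PySem.Int.mod r 2 = 0)
        (fun r => (PySem.List.pyRange 0 cols).map (fun c => (r, c, 1)))
        (fun r => (PySem.List.pyRange (cols - 1) (-1) (-1)).map (fun c => (r, c, -1)))]
      rw [List.nil_append]
      rfl
    have hB : scan_coords_alt rows cols "serpentine"
        = (PySem.List.pyRange 1 rows 2).foldl
            (fun acc r => pySetSlice acc (r * cols) ((r + 1) * cols) (pvBwd cols r))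
            ((PySem.List.pyRange 0 rows).flatMap (pvFwd cols)) := by
      unfold scan_coords_alt pvBwd pvFwd
      rw [if_neg (show ¬¬(("serpentine" : String) = "row_major" ∨ ("serpentine" : String) = "serpentine") by decide),
        if_pos rfl]
    have hos : ∀ r ∈ PySem.List.pyRange 1 rows 2, 1 ≤ r ∧ r < rows := by
      intro r hr
      have := (PySem.List.mem_pyRange_iff_of_pos (by norm_num) r).mp hr
      exact ⟨this.1, this.2.1⟩
    rw [hA, hB, pv_fold_slices rows cols _ hos (pvFwd cols) (fun x => pv_len_fwd cols x)]
    refine pv_flatMap_congr _ _ _ (fun x hx => ?_)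
    have hxr := PySem.List.mem_pyRange_one.mp hx
    rw [pv_update_fold_eval]
    by_cases hmem : x ∈ PySem.List.pyRange 1 rows 2
    · have hm := (PySem.List.mem_pyRange_iff_of_pos (by norm_num) x).mp hmem
      have hne : ¬ PySem.Int.mod x 2 = 0 := by
        rw [PySem.Int.mod_eq_emod_of_pos (by norm_num)]
        omega
      rw [if_pos hmem]
      unfold pvRowA pvBwd
      rw [if_neg hne]
    · have hm : ¬ (1 ≤ x ∧ x < rows ∧ (2 : Int) ∣ x - 1) := fun hc =>
        hmem ((PySem.List.mem_pyRange_iff_of_pos (by norm_num) x).mpr hc)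
      have heq : PySem.Int.mod x 2 = 0 := by
        rw [PySem.Int.mod_eq_emod_of_pos (by norm_num)]
        omega
      rw [if_neg hmem]
      unfold pvRowA pvFwd
      rw [if_pos heq]
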